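-- pv_equiv track=rewrite | github.com/sugrospi/IDS | phase1/prgrm to add missing value in third column.py | item_finder
-- ===== SOURCE A (Python) =====
-- def item_finder(a,b):
--
--
-- 	m=[]
-- 	n=[]
-- 	for i,j in b[a].items():
-- 		m.append(i)
-- 		n.append(j)
-- 	ans=m[n.index(max(n))]
-- 	return ans
-- ===== SOURCE B (Python) =====
-- def item_finder(a, b):
--     # sort the items by value, descending; Python's sort is stable and reverse=True
--     # keeps equal-valued items in insertion order, so [0] is the first maximal key
--     return sorted(b[a].items(), key=lambda kv: kv[1], reverse=True)[0][0]
-- ===== Notes on version B (the rewrite author's own statement) =====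
-- stated objective: alternative
-- what changed: B sorts the items by value in descending order (stable, so ties keep insertion order) and returns the first key, instead of A's parallel key/value lists with max() plus a linear .index() scan.
import Mathlib
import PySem

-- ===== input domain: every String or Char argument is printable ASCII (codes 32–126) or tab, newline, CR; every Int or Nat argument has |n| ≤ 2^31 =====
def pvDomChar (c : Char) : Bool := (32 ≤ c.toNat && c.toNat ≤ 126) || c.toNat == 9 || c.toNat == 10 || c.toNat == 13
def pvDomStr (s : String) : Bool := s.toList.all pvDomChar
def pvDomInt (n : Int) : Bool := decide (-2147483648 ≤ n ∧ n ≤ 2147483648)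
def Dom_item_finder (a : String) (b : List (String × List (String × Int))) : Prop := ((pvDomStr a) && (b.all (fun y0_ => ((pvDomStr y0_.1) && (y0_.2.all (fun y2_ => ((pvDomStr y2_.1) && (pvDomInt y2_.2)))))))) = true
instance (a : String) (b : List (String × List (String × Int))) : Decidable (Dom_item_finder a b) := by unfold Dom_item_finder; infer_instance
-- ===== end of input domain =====

-- B sorts the items by value descending (stable, so ties keep insertion order) and returns
-- the first key, instead of A's parallel key/value lists with max() and a .index() scan.

-- ===== PORT A =====
def item_finder (a : String) (b : List (String × List (String × Int))) : String :=
  match (PySem.Dict.mk b).get? a with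
  | none => ""            -- b[a]: KeyError, excluded by Pre_
  | some bl =>
    let m := bl.foldl (fun acc p => acc ++ [p.1]) ([] : List String)
    let n := bl.foldl (fun acc p => acc ++ [p.2]) ([] : List Int)
    match PySem.List.max? n (fun v => v) with
    | none => ""          -- max([]): ValueError, excluded by Pre_
    | some mx =>
      match PySem.List.index? n mx with
      | none => ""        -- unreachable: mx ∈ n
      | some i => PySem.List.pyGetD m (i : Int) ""

-- ===== PORT B =====
def item_finder_alt (a : String) (b : List (String × List (String × Int))) : String :=
  match (PySem.Dict.mk b).get? a with
  | none => ""            -- b[a]: KeyError, excluded by Pre_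
  | some dl =>
    -- sorted(b[a].items(), key=lambda kv: kv[1], reverse=True)[0][0]
    match PySem.List.pyGet? (PySem.List.sorted dl (fun kv => kv.2) true) 0 with
    | none => ""          -- [][0]: IndexError, excluded by Pre_
    | some p => p.1

-- ===== PRECONDITION & SPEC =====
-- Pre_ excludes the inputs where A raises (a not a key of b: KeyError; b[a] empty: ValueError)
-- and association lists whose inner dict b[a] has duplicate keys, which do not represent a
-- Python dict (the assoc-list encoding of a dict has unique keys).
def Pre_item_finder (a : String) (b : List (String × List (String × Int))) : Prop :=
  (match (PySem.Dict.mk b).get? a with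
   | none => false
   | some l => decide (l ≠ [] ∧ (l.map Prod.fst).Nodup)) = true
instance (a : String) (b : List (String × List (String × Int))) : Decidable (Pre_item_finder a b) := by unfold Pre_item_finder; infer_instance
def pvWitness_item_finder : String × (List (String × List (String × Int))) :=
  ("k", [("k", [("x", 1), ("y", 2)])])
def Spec_item_finder (a : String) (b : List (String × List (String × Int))) (out : String) : Prop := out = item_finder_alt a b
instance (a : String) (b : List (String × List (String × Int))) (out : String) : Decidable (Spec_item_finder a b out) := by unfold Spec_item_finder; infer_instance

-- ===== CLAIM (what is proved, stated in full; the proofs are below) =====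
def Claim_equal_item_finder : Prop := ∀ (a : String) (b : List (String × List (String × Int))), Dom_item_finder a b → Pre_item_finder a b → Spec_item_finder a b (item_finder a b)

-- ===== LEMMAS AND PROOFS =====

-- first argmax (ties to the earlier element): the common characterisation of both ports
def pvArgmax {α : Type} (key : α → Int) : List α → Option α
  | [] => none
  | x :: xs =>
    match pvArgmax key xs with
    | none => some x
    | some m => if key x < key m then some m else some x

theorem pvArgmax_nil {α : Type} (key : α → Int) : pvArgmax key [] = none := rfl

theorem pvArgmax_cons {α : Type} (key : α → Int) (x : α) (xs : List α) :
    pvArgmax key (x :: xs) =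
      match pvArgmax key xs with
      | none => some x
      | some m => if key x < key m then some m else some x := rfl

theorem pvArgmax_cons_none {α : Type} (key : α → Int) {x : α} {xs : List α}
    (hx : pvArgmax key xs = none) : pvArgmax key (x :: xs) = some x := by
  rw [pvArgmax_cons, hx]

theorem pvArgmax_cons_some {α : Type} (key : α → Int) {x m : α} {xs : List α}
    (hx : pvArgmax key xs = some m) :
    pvArgmax key (x :: xs) = if key x < key m then some m else some x := by
  rw [pvArgmax_cons, hx]

theorem pvArgmax_eq_none_iff {α : Type} (key : α → Int) (xs : List α) :
    pvArgmax key xs = none ↔ xs = [] := by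
  cases xs with
  | nil => simp [pvArgmax_nil]
  | cons x xs =>
    cases hx : pvArgmax key xs with
    | none => rw [pvArgmax_cons_none key hx]; simp
    | some m => rw [pvArgmax_cons_some key hx]; split_ifs <;> simp

-- the body of PySem.List.max?'s fold, named so the loop lemmas can be stated about it
def pvStep {α : Type} (key : α → Int) : Option α → α → Option α
  | none, x => some x
  | some m, x => if key m < key x then some x else some m

theorem max?_eq_foldl_pvStep {α : Type} (key : α → Int) (xs : List α) :
    PySem.List.max? xs key = xs.foldl (pvStep key) none := by
  unfold PySem.List.max?
  congr 1
  funext acc x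
  cases acc <;> rfl

theorem foldl_pvStep_choose {α : Type} (key : α → Int) (xs : List α) (a : α) :
    xs.foldl (pvStep key) (some a)
      = some (match pvArgmax key xs with
              | none => a
              | some m => if key a < key m then m else a) := by
  induction xs generalizing a with
  | nil => rfl
  | cons x xs ih =>
    simp only [List.foldl_cons]
    rw [show pvStep key (some a) x = if key a < key x then some x else some a from rfl]
    by_cases hax : key a < key x
    · rw [if_pos hax, ih]
      cases h : pvArgmax key xs with
      | none => rw [pvArgmax_cons_none key h]; simp [hax]
      | some m =>
        rw [pvArgmax_cons_some key h]
        by_cases hxm : key x < key m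
        · simp [hxm, show key a < key m by omega]
        · simp [hxm, hax]
    · rw [if_neg hax, ih]
      cases h : pvArgmax key xs with
      | none => rw [pvArgmax_cons_none key h]; simp [hax]
      | some m =>
        rw [pvArgmax_cons_some key h]
        by_cases hxm : key x < key m
        · simp [hxm]
        · simp [hxm, hax, show ¬ key a < key m by omega]

theorem max?_eq_pvArgmax {α : Type} (key : α → Int) (xs : List α) :
    PySem.List.max? xs key = pvArgmax key xs := by
  cases xs with
  | nil => rfl
  | cons x xs =>
    rw [max?_eq_foldl_pvStep, List.foldl_cons,
      show pvStep key none x = some x from rfl,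
      show List.foldl (pvStep key) (some x) xs = xs.foldl (pvStep key) (some x) from rfl,
      foldl_pvStep_choose]
    cases h : pvArgmax key xs with
    | none => rw [pvArgmax_cons_none key h]
    | some m =>
      rw [pvArgmax_cons_some key h]
      by_cases hxm : key x < key m <;> simp [hxm]

theorem pvArgmax_map {α β : Type} (f : α → β) (key : β → Int) (xs : List α) :
    pvArgmax key (xs.map f) = (pvArgmax (fun x => key (f x)) xs).map f := by
  induction xs with
  | nil => rfl
  | cons x xs ih =>
    cases hx : pvArgmax (fun x => key (f x)) xs with
    | none =>
      have hx' : pvArgmax key (xs.map f) = none := by rw [ih, hx]; rfl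
      rw [List.map_cons, pvArgmax_cons_none key hx', pvArgmax_cons_none _ hx]
      rfl
    | some m =>
      have hx' : pvArgmax key (xs.map f) = some (f m) := by rw [ih, hx]; rfl
      rw [List.map_cons, pvArgmax_cons_some key hx', pvArgmax_cons_some _ hx]
      by_cases hxm : key (f x) < key (f m) <;> simp [hxm]

-- head of the insertion step of sorted(·, reverse=True) is exactly max's fold step
theorem head?_insertBy_rev {α : Type} (key : α → Int) (x : α) (acc : List α) :
    (PySem.List.insertBy (fun a b => decide (key b < key a)) x acc).head?
      = pvStep key acc.head? x := by
  cases acc with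
  | nil => rfl
  | cons h t =>
    simp only [PySem.List.insertBy]
    by_cases hlt : key h < key x <;> simp [hlt, pvStep]

theorem head?_foldl_insertBy_rev {α : Type} (key : α → Int) (xs acc : List α) :
    (xs.foldl (fun acc x => PySem.List.insertBy (fun a b => decide (key b < key a)) x acc) acc).head?
      = xs.foldl (pvStep key) acc.head? := by
  induction xs generalizing acc with
  | nil => rfl
  | cons x xs ih =>
    simp only [List.foldl_cons]
    rw [ih, head?_insertBy_rev]

-- the head of the descending stable sort is the first argmax
theorem head?_sorted_rev {α : Type} (key : α → Int) (xs : List α) :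
    (PySem.List.sorted xs key true).head? = pvArgmax key xs := by
  rw [PySem.List.sorted_rev_eq_foldl_insertBy, head?_foldl_insertBy_rev,
    show ([] : List α).head? = none from rfl, ← max?_eq_foldl_pvStep, max?_eq_pvArgmax]

theorem pvArgmax_index (l : List (String × Int)) (p : String × Int)
    (h : pvArgmax (fun q => q.2) l = some p) :
    ∃ j : Nat, PySem.List.index? (l.map Prod.snd) p.2 = some j ∧
      PySem.List.pyGetD (l.map Prod.fst) (j : Int) "" = p.1 := by
  induction l generalizing p with
  | nil => simp [pvArgmax_nil] at h
  | cons x xs ih =>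
    cases hx : pvArgmax (fun q => q.2) xs with
    | none =>
      rw [pvArgmax_cons_none _ hx] at h
      simp only [Option.some.injEq] at h
      subst h
      refine ⟨0, ?_, ?_⟩
      · rw [List.map_cons]; exact PySem.List.index?_cons_self _ _
      · rw [List.map_cons, PySem.List.pyGetD_natCast]; simp
    | some m =>
      rw [pvArgmax_cons_some _ hx] at h
      by_cases hlt : x.2 < m.2
      · rw [if_pos hlt] at h
        simp only [Option.some.injEq] at h
        subst h
        obtain ⟨j, hj1, hj2⟩ := ih m hx
        refine ⟨j + 1, ?_, ?_⟩
        · rw [List.map_cons, PySem.List.index?_cons_of_ne _ (show x.2 ≠ m.2 by omega), hj1]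
          rfl
        · rw [List.map_cons, PySem.List.pyGetD_natCast]
          rw [PySem.List.pyGetD_natCast] at hj2
          simpa [List.getD] using hj2
      · rw [if_neg hlt] at h
        simp only [Option.some.injEq] at h
        subst h
        refine ⟨0, ?_, ?_⟩
        · rw [List.map_cons]; exact PySem.List.index?_cons_self _ _
        · rw [List.map_cons, PySem.List.pyGetD_natCast]; simp

-- ===== VERDICT (by name: the statement is the Claim_ definition above) =====
theorem item_finder_spec : Claim_equal_item_finder := by
  intro a b _hDom hPre
  unfold Spec_item_finder item_finder item_finder_alt
  unfold Pre_item_finder at hPre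
  cases hg : (PySem.Dict.mk b).get? a with
  | none => rw [hg] at hPre
  | some l =>
    rw [hg] at hPre
    simp only [decide_eq_true_eq] at hPre
    obtain ⟨hne, _hnd⟩ := hPre
    simp only [PySem.List.foldl_append_singleton_eq_map, List.nil_append]
    cases hA : pvArgmax (fun q => q.2) l with
    | none => exact absurd ((pvArgmax_eq_none_iff _ l).mp hA) hne
    | some p =>
      -- B side: the head of the descending stable sort is the first argmax
      have hB : (PySem.List.sorted l (fun kv => kv.2) true).head? = some p := by
        rw [head?_sorted_rev]; exact hA
      have hsortne : PySem.List.sorted l (fun kv => kv.2) true ≠ [] := by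
        intro h0; rw [h0] at hB; simp at hB
      have hBget : PySem.List.pyGet? (PySem.List.sorted l (fun kv => kv.2) true) 0 = some p := by
        cases hs : PySem.List.sorted l (fun kv => kv.2) true with
        | nil => exact absurd hs hsortne
        | cons q t =>
          rw [hs] at hB
          simp only [List.head?_cons, Option.some.injEq] at hB
          subst hB
          simp [PySem.List.pyGet?, PySem.List.pyIdx?]
      -- A side
      have hmx : PySem.List.max? (l.map Prod.snd) (fun v => v) = some p.2 := by
        rw [max?_eq_pvArgmax, pvArgmax_map, hA]; rfl
      obtain ⟨j, hj1, hj2⟩ := pvArgmax_index l p hA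
      simp only [hmx, hj1, hj2, hBget]
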